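-- pv_equiv track=rewrite | github.com/felipemaion/studying_python | permutate.py | find_mult_3
-- ===== SOURCE A (Python) =====
-- from itertools import permutations, combinations
-- from itertools import combinations
--
-- def find_mult_3(number):
--     number = list(str(number))
--     candidates, output = [], []
--     # Find all combinations mult. of 3.
--     for i in range(1, len(number) + 1):
--         candidates.append(["".join(a) for a in combinations(number, i)
--                            if int("".join(list(a))) % 3 == 0 and int("".join(list(a))) != 0])
--     # Remove subitems [[], [[],[],[],[]],[]] -> Flatten:
--     candidates = [item for sublist in candidates for item in sublist]
--     # Now permute those numbers to get all numbers.
--     for candidate in candidates: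
--         c = str(candidate)
--         output.append(["".join(list(a)) for a in permutations(c, len(c))])
--     # Flatten list:
--     output = [int(item) for sublist in output for item in sublist]
--     # Remove Duplicates:
--     output = list(set(output))
--     return [len(output), max(output)]
-- ===== SOURCE B (Python) =====
-- from itertools import permutations
--
-- def find_mult_3(number):
--     digits = str(number)
--     found = set()
--     for i in range(1, len(digits) + 1):
--         for p in permutations(digits, i):
--             v = int("".join(p))
--             if v % 3 == 0 and v != 0:
--                 found.add(v)
--     return [len(found), max(found)]
-- ===== Notes on version B (the rewrite author's own statement) =====
-- stated objective: simpler
-- what changed: A filters combinations by their value's divisibility, permutes each surviving combination, flattens two staged list-of-list pipelines and dedupes once at the end; B is a single nested loop over all r-permutations of the digits that tests each arrangement's own value and inserts it into one result set as it goes.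
import Mathlib
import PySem

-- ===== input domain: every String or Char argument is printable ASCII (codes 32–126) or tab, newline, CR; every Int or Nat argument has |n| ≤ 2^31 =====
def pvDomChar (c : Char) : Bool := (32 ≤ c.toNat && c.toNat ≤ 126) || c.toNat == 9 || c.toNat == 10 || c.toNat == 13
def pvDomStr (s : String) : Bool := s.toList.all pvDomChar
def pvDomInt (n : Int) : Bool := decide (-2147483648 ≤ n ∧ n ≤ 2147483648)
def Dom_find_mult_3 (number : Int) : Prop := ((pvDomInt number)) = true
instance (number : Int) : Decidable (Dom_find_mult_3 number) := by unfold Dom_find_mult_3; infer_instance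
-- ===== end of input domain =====

-- B replaces A's two-stage pipeline (filter combinations by their value's divisibility, then
-- permute each survivor, flatten, dedupe at the very end) with one nested loop over all
-- r-permutations that tests each arrangement's own value and collects into a set as it goes
-- (objective: simpler).
-- Python strings of digit characters are modelled as their character lists (''.join and
-- list(...) are identities in that model).  int(s) is ported as the digit fold pvToInt, which
-- is exact for nonempty ASCII-digit strings — the only arguments it receives when
-- number ≥ 0, which Pre_ guarantees.  Python raises ValueError for negative input (int of a
-- permutation containing '-') and when no arrangement qualifies (max of an empty sequence):
-- Pre_ excludes exactly those inputs; only there do the ports fall back to .getD 0.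

-- value of a nonempty ASCII-digit string, as Python's int() computes it there
def pvToInt (cs : List Char) : Int :=
  cs.foldl (fun a c => 10 * a + ((c.toNat : Int) - 48)) 0

-- ===== PORT A =====
def find_mult_3 (number : Int) : List Int :=
  let numberL : List Char := (PySem.Int.toStr number).toList
  -- for i in range(1, len(number)+1): candidates.append([''.join(a) for a in combinations(number, i) if int(''.join(list(a))) % 3 == 0 and int(''.join(list(a))) != 0])
  let candidates : List (List (List Char)) :=
    (PySem.List.pyRange 1 ((numberL.length : Int) + 1) 1).foldl
      (fun acc i =>
        acc ++ [((PySem.List.combinations numberL i.toNat).filter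
          (fun a => PySem.Int.mod (pvToInt a) 3 == 0 && pvToInt a != 0))])
      []
  -- candidates = [item for sublist in candidates for item in sublist]
  let candidatesF : List (List Char) := candidates.flatMap (fun sublist => sublist)
  -- for candidate in candidates: output.append([''.join(list(a)) for a in permutations(c, len(c))])
  let output : List (List (List Char)) :=
    candidatesF.foldl (fun acc c => acc ++ [PySem.List.permutations c c.length]) []
  -- output = [int(item) for sublist in output for item in sublist]
  let outputF : List Int := output.flatMap (fun sublist => sublist.map pvToInt)
  -- output = list(set(output)); return [len(output), max(output)]  (len and max are order-blind)
  let outputS : PySem.Set Int := PySem.Set.ofList outputF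
  [(outputS.length : Int), (PySem.List.max? outputS (fun x => x)).getD 0]

-- ===== PORT B =====
def find_mult_3_alt (number : Int) : List Int :=
  let digits : List Char := (PySem.Int.toStr number).toList
  let found : PySem.Set Int :=
    (PySem.List.pyRange 1 ((digits.length : Int) + 1) 1).foldl
      (fun s i =>
        (PySem.List.permutations digits i.toNat).foldl
          (fun s p =>
            let v := pvToInt p
            if PySem.Int.mod v 3 == 0 && v != 0 then PySem.Set.add s v else s)
          s)
      []
  [(found.length : Int), (PySem.List.max? found (fun x => x)).getD 0]

-- ===== PRECONDITION & SPEC =====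
-- Pre_ excludes exactly the inputs where Python A raises ValueError: negative numbers
-- (int() of an arrangement containing '-') and numbers whose digits admit no nonzero
-- multiple-of-3 arrangement (max([]) raises).  The second conjunct says, in closed form on
-- the decimal digits: some digit is 3/6/9, or three digits have residue 1, or three have
-- residue 2, or one of each.
def Pre_find_mult_3 (number : Int) : Prop :=
  0 ≤ number ∧
  (1 ≤ (PySem.Int.toChars number).countP (fun c => c == '3' || c == '6' || c == '9') ∨
   3 ≤ (PySem.Int.toChars number).countP (fun c => c == '1' || c == '4' || c == '7') ∨
   3 ≤ (PySem.Int.toChars number).countP (fun c => c == '2' || c == '5' || c == '8') ∨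
   (1 ≤ (PySem.Int.toChars number).countP (fun c => c == '1' || c == '4' || c == '7') ∧
    1 ≤ (PySem.Int.toChars number).countP (fun c => c == '2' || c == '5' || c == '8')))
instance (number : Int) : Decidable (Pre_find_mult_3 number) := by
  unfold Pre_find_mult_3; infer_instance

def pvWitness_find_mult_3 : Int := 3

def Spec_find_mult_3 (number : Int) (out : List Int) : Prop := out = find_mult_3_alt number
instance (number : Int) (out : List Int) : Decidable (Spec_find_mult_3 number out) := by
  unfold Spec_find_mult_3; infer_instance

-- ===== CLAIM (what is proved, stated in full; the proofs are below) =====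
def Claim_equal_find_mult_3 : Prop := ∀ (number : Int), Dom_find_mult_3 number → Pre_find_mult_3 number → Spec_find_mult_3 number (find_mult_3 number)

-- ===== LEMMAS AND PROOFS =====

-- chars produced by str(n) for 0 ≤ n are ASCII digits
def pvIsDigitChar (c : Char) : Prop := 48 ≤ c.toNat ∧ c.toNat ≤ 57

lemma pvDigitChar_digitChar (m : ℕ) (h : m < 10) : pvIsDigitChar (Nat.digitChar m) := by
  interval_cases m <;> exact ⟨by decide, by decide⟩

lemma pvToDigitsCore_digits (fuel : ℕ) :
    ∀ (n : ℕ) (acc : List Char), (∀ c ∈ acc, pvIsDigitChar c) →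
      ∀ c ∈ Nat.toDigitsCore 10 fuel n acc, pvIsDigitChar c := by
  induction fuel with
  | zero => intro n acc hacc; simpa [Nat.toDigitsCore] using hacc
  | succ f ih =>
    intro n acc hacc c hc
    simp only [Nat.toDigitsCore] at hc
    split at hc
    · rcases List.mem_cons.mp hc with h | h
      · exact h ▸ pvDigitChar_digitChar _ (Nat.mod_lt _ (by norm_num))
      · exact hacc _ h
    · exact ih _ _ (by
        intro x hx
        rcases List.mem_cons.mp hx with h | h
        · exact h ▸ pvDigitChar_digitChar _ (Nat.mod_lt _ (by norm_num))
        · exact hacc _ h) c hc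

lemma pvDigits_digits (n : Int) (h : 0 ≤ n) :
    ∀ c ∈ (PySem.Int.toStr n).toList, pvIsDigitChar c := by
  rw [PySem.Int.toList_toStr]
  unfold PySem.Int.toChars
  rw [if_neg (by omega)]
  unfold Nat.toDigits
  exact pvToDigitsCore_digits _ _ _ (by simp)

-- digit value of a character
def pvDV (c : Char) : Int := (c.toNat : Int) - 48

lemma pvToInt_eq (l : List Char) :
    pvToInt l = l.foldl (fun a c => 10 * a + pvDV c) 0 := rfl

lemma pvFold_mod3 (l : List Char) : ∀ a : Int,
    (l.foldl (fun a c => 10 * a + pvDV c) a) % 3 = (a + (l.map pvDV).sum) % 3 := by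
  induction l with
  | nil => intro a; simp
  | cons c t ih =>
    intro a
    simp only [List.foldl_cons, List.map_cons, List.sum_cons, ih]
    omega

lemma pvFold_nonneg (l : List Char) (hl : ∀ c ∈ l, pvIsDigitChar c) :
    ∀ a : Int, 0 ≤ a → 0 ≤ l.foldl (fun a c => 10 * a + pvDV c) a := by
  induction l with
  | nil => intro a ha; simpa using ha
  | cons c t ih =>
    intro a ha
    obtain ⟨h1, h2⟩ := hl c (by simp)
    simp only [List.foldl_cons]
    exact ih (fun x hx => hl x (by simp [hx])) _ (by unfold pvDV; omega)

lemma pvChar_eq_zero_of_toNat (c : Char) (h : c.toNat = 48) : c = '0' :=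
  Char.ext (UInt32.toNat_inj.mp h)

lemma pvFold_zero_iff (l : List Char) (hl : ∀ c ∈ l, pvIsDigitChar c) :
    (l.foldl (fun a c => 10 * a + pvDV c) 0 = 0 ↔ ∀ c ∈ l, c = '0') := by
  induction l using List.reverseRecOn with
  | nil => simp
  | append_singleton t c ih =>
    obtain ⟨h1, h2⟩ := hl c (by simp)
    have ht : ∀ x ∈ t, pvIsDigitChar x := fun x hx => hl x (by simp [hx])
    have hnn := pvFold_nonneg t ht 0 le_rfl
    rw [List.foldl_append]
    simp only [List.foldl_cons, List.foldl_nil]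
    constructor
    · intro h
      have hv : t.foldl (fun a c => 10 * a + pvDV c) 0 = 0 ∧ pvDV c = 0 := by
        unfold pvDV at h ⊢; constructor <;> omega
      intro x hx
      rcases List.mem_append.mp hx with h' | h'
      · exact (ih ht).mp hv.1 x h'
      · have hxc : x = c := by simpa using h'
        subst hxc
        exact pvChar_eq_zero_of_toNat x (by unfold pvDV at hv; omega)
    · intro h
      have hz : t.foldl (fun a c => 10 * a + pvDV c) 0 = 0 :=
        (ih ht).mpr (fun x hx => h x (by simp [hx]))
      have hc0 : c = '0' := h c (by simp)
      rw [hz, hc0]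
      decide

-- the Boolean test both ports perform on a value
def pvCond (v : Int) : Bool := PySem.Int.mod v 3 == 0 && v != 0

lemma pvCond_perm (p c : List Char) (hp : p.Perm c) (hd : ∀ x ∈ c, pvIsDigitChar x) :
    pvCond (pvToInt p) = pvCond (pvToInt c) := by
  have hdp : ∀ x ∈ p, pvIsDigitChar x := fun x hx => hd x (hp.mem_iff.mp hx)
  have hsum : (p.map pvDV).sum = (c.map pvDV).sum := (hp.map pvDV).sum_eq
  have h3 : pvToInt p % 3 = pvToInt c % 3 := by
    rw [pvToInt_eq, pvToInt_eq, pvFold_mod3, pvFold_mod3, hsum]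
  have h0 : pvToInt p = 0 ↔ pvToInt c = 0 := by
    rw [pvToInt_eq, pvToInt_eq, pvFold_zero_iff p hdp, pvFold_zero_iff c hd]
    exact ⟨fun h x hx => h x (hp.mem_iff.mpr hx), fun h x hx => h x (hp.mem_iff.mp hx)⟩
  unfold pvCond
  rw [PySem.Int.mod_eq_emod_of_pos (by norm_num), PySem.Int.mod_eq_emod_of_pos (by norm_num),
    h3]
  congr 1
  simp only [bne]
  by_cases h : pvToInt c = 0
  · rw [beq_iff_eq.mpr h, beq_iff_eq.mpr (h0.mpr h)]
  · rw [beq_eq_false_iff_ne.mpr h, beq_eq_false_iff_ne.mpr (fun hp0 => h (h0.mp hp0))]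

-- membership in PySem.List.permutations: exactly the length-r sub-permutations
lemma pvMem_permutations_iff (r : ℕ) : ∀ (xs p : List Char),
    p ∈ PySem.List.permutations xs r ↔ p.length = r ∧ p.Subperm xs := by
  induction r with
  | zero =>
    intro xs p
    rw [PySem.List.permutations_zero]
    constructor
    · rintro h
      have hp : p = [] := by simpa using h
      subst hp; exact ⟨rfl, List.nil_subperm⟩
    · rintro ⟨hl, _⟩
      have hp : p = [] := List.length_eq_zero_iff.mp hl
      simp [hp]
  | succ r ih =>
    intro xs p
    constructor
    · intro h
      obtain ⟨hlen, rest, hperm⟩ := PySem.List.exists_perm_of_mem_permutations (r+1) xs p h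
      exact ⟨hlen, ((List.sublist_append_left p rest).subperm).trans hperm.subperm⟩
    · rintro ⟨hlen, hsub⟩
      cases p with
      | nil => simp at hlen
      | cons a q =>
        have ha : a ∈ xs := hsub.subset (List.mem_cons_self ..)
        obtain ⟨i, hi, hgi⟩ := List.getElem_of_mem ha
        have hpermx : xs.Perm (a :: xs.eraseIdx i) := by
          simpa [hgi] using (List.getElem_cons_eraseIdx_perm hi).symm
        have hq : q.Subperm (xs.eraseIdx i) :=
          (List.subperm_cons a).mp (hsub.trans hpermx.subperm)
        have hmemq : q ∈ PySem.List.permutations (xs.eraseIdx i) r :=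
          (ih _ q).mpr ⟨by simpa using hlen, hq⟩
        simp only [PySem.List.permutations]
        rw [List.mem_flatMap]
        refine ⟨i, by simp [hi], ?_⟩
        rw [List.getElem?_eq_getElem hi, hgi]
        simp only [List.mem_map]
        exact ⟨q, hmemq, rfl⟩

-- the values a run collects, as a predicate on v (digits is str(number) as chars)
def pvGood (digits : List Char) (v : Int) : Prop :=
  ∃ p : List Char, p.Subperm digits ∧ 1 ≤ p.length ∧
    pvCond (pvToInt p) = true ∧ v = pvToInt p

-- membership in B's inner loop
lemma pvMem_inner (l : List (List Char)) : ∀ (s : PySem.Set Int) (v : Int),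
    (v ∈ l.foldl
      (fun s p =>
        let w := pvToInt p
        if PySem.Int.mod w 3 == 0 && w != 0 then PySem.Set.add s w else s) s) ↔
      v ∈ s ∨ ∃ p ∈ l, pvCond (pvToInt p) = true ∧ v = pvToInt p := by
  induction l with
  | nil => intro s v; simp
  | cons p t ih =>
    intro s v
    simp only [List.foldl_cons]
    by_cases hc : pvCond (pvToInt p) = true
    · rw [show (if (PySem.Int.mod (pvToInt p) 3 == 0 && pvToInt p != 0) = true
            then PySem.Set.add s (pvToInt p) else s) =
          PySem.Set.add s (pvToInt p) from if_pos hc]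
      rw [ih]
      rw [PySem.Set.mem_add]
      constructor
      · rintro ((h | h) | h)
        · exact Or.inl h
        · exact Or.inr ⟨p, by simp, hc, h⟩
        · obtain ⟨x, hx, hgx, hv⟩ := h
          exact Or.inr ⟨x, by simp [hx], hgx, hv⟩
      · rintro (h | ⟨x, hx, hgx, hv⟩)
        · exact Or.inl (Or.inl h)
        · rcases List.mem_cons.mp hx with h' | h'
          · exact Or.inl (Or.inr (h' ▸ hv))
          · exact Or.inr ⟨x, h', hgx, hv⟩
    · rw [show (if (PySem.Int.mod (pvToInt p) 3 == 0 && pvToInt p != 0) = true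
            then PySem.Set.add s (pvToInt p) else s) = s from if_neg hc]
      rw [ih]
      constructor
      · rintro (h | ⟨x, hx, hgx, hv⟩)
        · exact Or.inl h
        · exact Or.inr ⟨x, by simp [hx], hgx, hv⟩
      · rintro (h | ⟨x, hx, hgx, hv⟩)
        · exact Or.inl h
        · rcases List.mem_cons.mp hx with h' | h'
          · exact absurd (h' ▸ hgx) hc
          · exact Or.inr ⟨x, h', hgx, hv⟩

-- membership in B's outer loop
lemma pvMem_outer (digits : List Char) (is : List Int) : ∀ (s : PySem.Set Int) (v : Int),
    (v ∈ is.foldl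
      (fun s i =>
        (PySem.List.permutations digits i.toNat).foldl
          (fun s p =>
            let w := pvToInt p
            if PySem.Int.mod w 3 == 0 && w != 0 then PySem.Set.add s w else s) s) s) ↔
      v ∈ s ∨ ∃ i ∈ is, ∃ p ∈ PySem.List.permutations digits i.toNat,
        pvCond (pvToInt p) = true ∧ v = pvToInt p := by
  induction is with
  | nil => intro s v; simp
  | cons i t ih =>
    intro s v
    simp only [List.foldl_cons]
    rw [ih, pvMem_inner]
    constructor
    · rintro ((h | ⟨p, hp, hg, hv⟩) | ⟨j, hj, hrest⟩)
      · exact Or.inl h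
      · exact Or.inr ⟨i, by simp, p, hp, hg, hv⟩
      · exact Or.inr ⟨j, by simp [hj], hrest⟩
    · rintro (h | ⟨j, hj, hrest⟩)
      · exact Or.inl (Or.inl h)
      · rcases List.mem_cons.mp hj with h' | h'
        · exact Or.inl (Or.inr (h' ▸ hrest))
        · exact Or.inr ⟨j, h', hrest⟩

-- B's loops stay duplicate-free
lemma pvNodup_inner (l : List (List Char)) : ∀ (s : PySem.Set Int), s.Nodup →
    (l.foldl
      (fun s p =>
        let w := pvToInt p
        if PySem.Int.mod w 3 == 0 && w != 0 then PySem.Set.add s w else s) s).Nodup := by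
  induction l with
  | nil => intro s hs; simpa using hs
  | cons p t ih =>
    intro s hs
    simp only [List.foldl_cons]
    apply ih
    dsimp only
    split
    · exact PySem.Set.nodup_add s _ hs
    · exact hs

lemma pvNodup_outer (digits : List Char) (is : List Int) : ∀ (s : PySem.Set Int), s.Nodup →
    (is.foldl
      (fun s i =>
        (PySem.List.permutations digits i.toNat).foldl
          (fun s p =>
            let w := pvToInt p
            if PySem.Int.mod w 3 == 0 && w != 0 then PySem.Set.add s w else s) s) s).Nodup := by
  induction is with
  | nil => intro s hs; simpa using hs
  | cons i t ih =>
    intro s hs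
    simp only [List.foldl_cons]
    exact ih _ (pvNodup_inner _ _ hs)

-- max (no key) only depends on the elements
lemma pvMax?_perm (l₁ l₂ : List Int) (h : l₁.Perm l₂) :
    PySem.List.max? l₁ (fun x => x) = PySem.List.max? l₂ (fun x => x) := by
  cases h1 : PySem.List.max? l₁ (fun x => x) with
  | none =>
    rw [PySem.List.max?_eq_none_iff] at h1
    subst h1
    exact ((PySem.List.max?_eq_none_iff l₂ _).mpr h.symm.eq_nil).symm
  | some m =>
    cases h2 : PySem.List.max? l₂ (fun x => x) with
    | none =>
      rw [PySem.List.max?_eq_none_iff] at h2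
      subst h2
      rw [h.eq_nil, (PySem.List.max?_eq_none_iff [] _).mpr rfl] at h1
      exact h1.symm
    | some m' =>
      have hm := PySem.List.max?_mem h1
      have hm' := PySem.List.max?_mem h2
      have le1 : m ≤ m' := PySem.List.max?_isMax h2 m (h.mem_iff.mp hm)
      have le2 : m' ≤ m := PySem.List.max?_isMax h1 m' (h.mem_iff.mpr hm')
      rw [le_antisymm le1 le2]

lemma pvB_iff (digits : List Char) (v : Int) :
    (∃ i ∈ PySem.List.pyRange 1 ((digits.length : Int) + 1) 1,
      ∃ p ∈ PySem.List.permutations digits i.toNat,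
        pvCond (pvToInt p) = true ∧ v = pvToInt p) ↔ pvGood digits v := by
  constructor
  · rintro ⟨i, hi, p, hp, hg, hv⟩
    rw [PySem.List.mem_pyRange_one] at hi
    obtain ⟨hlen, hsub⟩ := (pvMem_permutations_iff _ _ _).mp hp
    exact ⟨p, hsub, by omega, hg, hv⟩
  · rintro ⟨p, hsub, hlen, hg, hv⟩
    refine ⟨(p.length : Int), ?_, p, ?_, hg, hv⟩
    · rw [PySem.List.mem_pyRange_one]
      have := hsub.length_le
      omega
    · rw [pvMem_permutations_iff]
      exact ⟨by simp, hsub⟩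

-- what A's pipeline collects (before dedup), characterised
lemma pvA_iff (digits : List Char) (hd : ∀ c ∈ digits, pvIsDigitChar c) (v : Int) :
    (v ∈ ((((PySem.List.pyRange 1 ((digits.length : Int) + 1) 1).foldl
      (fun acc i => acc ++ [((PySem.List.combinations digits i.toNat).filter
        (fun a => PySem.Int.mod (pvToInt a) 3 == 0 && pvToInt a != 0))]) []).flatMap
        (fun sublist => sublist)).foldl
        (fun acc c => acc ++ [PySem.List.permutations c c.length]) []).flatMap
        (fun sublist => sublist.map pvToInt)) ↔ pvGood digits v := by
  rw [PySem.List.foldl_append_singleton_eq_map]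
  rw [PySem.List.foldl_append_singleton_eq_map]
  simp only [List.nil_append, List.mem_flatMap, List.mem_map,
    PySem.List.mem_pyRange_one]
  constructor
  · rintro ⟨sub, ⟨c, ⟨filt, ⟨i, hi, rfl⟩, hcmem⟩, rfl⟩, p, hp, rfl⟩
    obtain ⟨hcall, hcond⟩ := List.mem_filter.mp hcmem
    obtain ⟨hsublist, hclen⟩ := (PySem.List.mem_combinations_iff _ _ _).mp hcall
    have hpc : p.Perm c := PySem.List.perm_of_mem_permutations hp
    have hdc : ∀ x ∈ c, pvIsDigitChar x := fun x hx => hd x (hsublist.subset hx)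
    refine ⟨p, ⟨c, hpc.symm, hsublist⟩, ?_, ?_, rfl⟩
    · have h1 := hpc.length_eq
      omega
    · rw [pvCond_perm p c hpc hdc]
      exact hcond
  · rintro ⟨p, hsub, hlen, hg, rfl⟩
    obtain ⟨c, hcp, hsublist⟩ := hsub
    have hdc : ∀ x ∈ c, pvIsDigitChar x := fun x hx => hd x (hsublist.subset hx)
    have hclen : 1 ≤ c.length := by have := hcp.length_eq; omega
    have hcond : pvCond (pvToInt c) = true := by
      rw [← pvCond_perm p c hcp.symm hdc]; exact hg
    refine ⟨PySem.List.permutations c c.length,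
      ⟨c, ⟨_, ⟨(c.length : Int), ⟨by exact_mod_cast hclen, ?_⟩, rfl⟩, ?_⟩, rfl⟩,
      p, ?_, rfl⟩
    · have := hsublist.length_le
      omega
    · refine List.mem_filter.mpr ⟨?_, hcond⟩
      rw [PySem.List.mem_combinations_iff]
      exact ⟨hsublist, by simp⟩
    · rw [pvMem_permutations_iff]
      exact ⟨hcp.length_eq.symm, hcp.symm.subperm⟩

-- the two intermediate collections, named for the final argument
def pvListA (digits : List Char) : List Int :=
  ((((PySem.List.pyRange 1 ((digits.length : Int) + 1) 1).foldl
      (fun acc i => acc ++ [((PySem.List.combinations digits i.toNat).filter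
        (fun a => PySem.Int.mod (pvToInt a) 3 == 0 && pvToInt a != 0))]) []).flatMap
        (fun sublist => sublist)).foldl
        (fun acc c => acc ++ [PySem.List.permutations c c.length]) []).flatMap
        (fun sublist => sublist.map pvToInt)

def pvSetB (digits : List Char) : PySem.Set Int :=
  (PySem.List.pyRange 1 ((digits.length : Int) + 1) 1).foldl
    (fun s i =>
      (PySem.List.permutations digits i.toNat).foldl
        (fun s p =>
          let v := pvToInt p
          if PySem.Int.mod v 3 == 0 && v != 0 then PySem.Set.add s v else s)
        s) []

-- A's deduped collection is a rearrangement of B's set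
lemma pvPerm (digits : List Char) (hd : ∀ c ∈ digits, pvIsDigitChar c) :
    (PySem.Set.ofList (pvListA digits)).Perm (pvSetB digits) := by
  apply (List.perm_ext_iff_of_nodup (PySem.Set.nodup_ofList _)
    (pvNodup_outer _ _ [] List.nodup_nil)).mpr
  intro v
  unfold pvListA
  rw [PySem.Set.mem_ofList, pvA_iff _ hd v, pvMem_outer]
  simp only [List.not_mem_nil, false_or]
  rw [pvB_iff]

theorem find_mult_3_spec : Claim_equal_find_mult_3 := by
  intro number _ hpre
  obtain ⟨h0, -⟩ := hpre
  have eA : find_mult_3 number =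
      [((PySem.Set.ofList (pvListA (PySem.Int.toStr number).toList)).length : Int),
       (PySem.List.max? (PySem.Set.ofList (pvListA (PySem.Int.toStr number).toList))
         (fun x => x)).getD 0] := rfl
  have eB : find_mult_3_alt number =
      [((pvSetB (PySem.Int.toStr number).toList).length : Int),
       (PySem.List.max? (pvSetB (PySem.Int.toStr number).toList) (fun x => x)).getD 0] := rfl
  have hperm := pvPerm _ (pvDigits_digits number h0)
  unfold Spec_find_mult_3
  rw [eA, eB, hperm.length_eq, pvMax?_perm _ _ hperm]
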